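-- pv_equiv track=rewrite | github.com/adrian207/Mac-Compliance-System | agent/collectors/software_inventory.py | _check_critical_software
-- ===== SOURCE A (Python) =====
-- from typing import Any, Dict, List, Optional
--
-- def _check_critical_software(inventory: Dict[str, Any]) -> Dict[str, Any]:
--     """
--     Check for presence of critical security and productivity software.
--
--     Args:
--         inventory: Software inventory dict
--
--     Returns:
--         Dict of critical software status
--     """
--     items = inventory.get("items", [])
--     item_names = [item["name"].lower() for item in items]
--
--     critical_software = {
--         "browsers": {
--             "chrome": any("chrome" in name for name in item_names),
--             "firefox": any("firefox" in name for name in item_names),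
--             "safari": any("safari" in name for name in item_names),
--             "edge": any("edge" in name for name in item_names)
--         },
--         "security": {
--             "antivirus": any(av in ' '.join(item_names) for av in ["crowdstrike", "sentinel", "sophos", "malwarebytes"]),
--             "vpn": any(vpn in ' '.join(item_names) for vpn in ["zscaler", "globalprotect", "cisco anyconnect", "openvpn"]),
--             "password_manager": any(pm in ' '.join(item_names) for pm in ["1password", "lastpass", "dashlane", "bitwarden"])
--         },
--         "productivity": {
--             "office": any(office in ' '.join(item_names) for office in ["microsoft office", "microsoft word", "microsoft excel"]),
--             "slack": any("slack" in name for name in item_names),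
--             "zoom": any("zoom" in name for name in item_names),
--             "teams": any("teams" in name for name in item_names)
--         }
--     }
--
--     return critical_software
-- ===== SOURCE B (Python) =====
-- _TABLE = [
--     ("browsers", [("chrome", ["chrome"]), ("firefox", ["firefox"]),
--                   ("safari", ["safari"]), ("edge", ["edge"])]),
--     ("security", [("antivirus", ["crowdstrike", "sentinel", "sophos", "malwarebytes"]),
--                   ("vpn", ["zscaler", "globalprotect", "cisco anyconnect", "openvpn"]),
--                   ("password_manager", ["1password", "lastpass", "dashlane", "bitwarden"])]),
--     ("productivity", [("office", ["microsoft office", "microsoft word", "microsoft excel"]),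
--                       ("slack", ["slack"]), ("zoom", ["zoom"]), ("teams", ["teams"])]),
-- ]
--
-- def _check_critical_software(inventory):
--     """Table-driven multi-pattern scan: walk the joined lowercased-name text ONCE,
--     position by position, collecting the set of keywords that start at each
--     position; then assemble the result dict from the table and that set."""
--     items = inventory.get("items", [])
--     joined = ' '.join(item["name"].lower() for item in items)
--     all_kws = [kw for _, flags in _TABLE for _, kws in flags for kw in kws]
--     found = set()
--     for i in range(len(joined) + 1):
--         suffix = joined[i:]
--         for kw in all_kws:
--             if suffix.startswith(kw):
--                 found.add(kw)
--     return {group: {flag: any(kw in found for kw in kws) for flag, kws in flags}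
--             for group, flags in _TABLE}
-- ===== Notes on version B (the rewrite author's own statement) =====
-- stated objective: alternative
-- what changed: B replaces A's 11 hard-coded per-flag substring scans (per-item scans for single-word flags, a fresh join per multi-word group) by one table of (group, flag, keywords), a single position-by-position sweep of the joined lowercased text that collects the set of keywords starting at each position, and a table-driven assembly of the nested dict from that set.
import Mathlib
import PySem

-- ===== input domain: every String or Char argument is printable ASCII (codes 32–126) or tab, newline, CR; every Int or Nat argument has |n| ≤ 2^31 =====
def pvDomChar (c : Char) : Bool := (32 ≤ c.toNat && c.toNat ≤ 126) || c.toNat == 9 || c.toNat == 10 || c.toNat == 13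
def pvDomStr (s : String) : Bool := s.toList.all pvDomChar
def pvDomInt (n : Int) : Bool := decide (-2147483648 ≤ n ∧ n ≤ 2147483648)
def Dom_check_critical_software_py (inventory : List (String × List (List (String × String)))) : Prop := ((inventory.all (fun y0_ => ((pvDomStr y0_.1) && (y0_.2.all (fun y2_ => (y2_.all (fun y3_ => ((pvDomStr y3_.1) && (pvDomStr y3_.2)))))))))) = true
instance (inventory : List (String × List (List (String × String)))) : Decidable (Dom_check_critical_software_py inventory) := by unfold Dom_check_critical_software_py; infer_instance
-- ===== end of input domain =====

-- B replaces A's hard-coded per-flag substring scans by a keyword table, ONE position-by-position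
-- sweep of the joined lowercased text collecting the set of keywords found, and a table-driven
-- assembly of the nested result (objective: alternative; same asymptotic cost).

-- ===== PORT A =====
-- item["name"] (KeyError if absent; Pre_ excludes that, the .getD "" is never reached inside Pre_)
def check_critical_software_py (inventory : List (String × List (List (String × String)))) : List (String × List (String × Bool)) :=
  let items := (PySem.Dict.mk inventory).getD "items" []
  let item_names := items.map (fun item => PySem.Str.lower (((PySem.Dict.mk item).get? "name").getD ""))
  [("browsers",
     [("chrome", item_names.any (fun name => PySem.Str.isIn "chrome" name)),
      ("firefox", item_names.any (fun name => PySem.Str.isIn "firefox" name)),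
      ("safari", item_names.any (fun name => PySem.Str.isIn "safari" name)),
      ("edge", item_names.any (fun name => PySem.Str.isIn "edge" name))]),
   ("security",
     [("antivirus", (["crowdstrike", "sentinel", "sophos", "malwarebytes"] : List String).any
         (fun av => PySem.Str.isIn av (PySem.Str.join " " item_names))),
      ("vpn", (["zscaler", "globalprotect", "cisco anyconnect", "openvpn"] : List String).any
         (fun vpn => PySem.Str.isIn vpn (PySem.Str.join " " item_names))),
      ("password_manager", (["1password", "lastpass", "dashlane", "bitwarden"] : List String).any
         (fun pm => PySem.Str.isIn pm (PySem.Str.join " " item_names)))]),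
   ("productivity",
     [("office", (["microsoft office", "microsoft word", "microsoft excel"] : List String).any
         (fun office => PySem.Str.isIn office (PySem.Str.join " " item_names))),
      ("slack", item_names.any (fun name => PySem.Str.isIn "slack" name)),
      ("zoom", item_names.any (fun name => PySem.Str.isIn "zoom" name)),
      ("teams", item_names.any (fun name => PySem.Str.isIn "teams" name))])]

-- ===== PORT B =====
-- the module-level _TABLE of Source B
def pvTable : List (String × List (String × List String)) :=
  [("browsers", [("chrome", ["chrome"]), ("firefox", ["firefox"]),
                 ("safari", ["safari"]), ("edge", ["edge"])]),
   ("security", [("antivirus", ["crowdstrike", "sentinel", "sophos", "malwarebytes"]),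
                 ("vpn", ["zscaler", "globalprotect", "cisco anyconnect", "openvpn"]),
                 ("password_manager", ["1password", "lastpass", "dashlane", "bitwarden"])]),
   ("productivity", [("office", ["microsoft office", "microsoft word", "microsoft excel"]),
                     ("slack", ["slack"]), ("zoom", ["zoom"]), ("teams", ["teams"])])]

-- Source B's all_kws (flattened keyword list; as char lists, since the scan works character-wise)
def pvAllKws : List (List Char) :=
  (pvTable.flatMap (fun g => g.2.flatMap (fun f => f.2))).map String.toList

-- the inner 'for kw in all_kws: if suffix.startswith(kw): found.add(kw)' of Source B
def pvScanStep (suf : List Char) (found : PySem.Set (List Char)) (kws : List (List Char)) : PySem.Set (List Char) :=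
  kws.foldl (fun acc kw => if PySem.Chars.startswith suf kw then PySem.Set.add acc kw else acc) found

-- Source B's 'for i in range(len(joined)+1): suffix = joined[i:] …': the i-th suffix is the i-th
-- tail of the char list, so the loop is structural recursion on that list (exact: joined[i:]
-- equals drop i; the final i = len gives the empty suffix, the base case here)
def pvScan (kws : List (List Char)) : List Char → PySem.Set (List Char) → PySem.Set (List Char)
  | [], found => pvScanStep [] found kws
  | c :: t, found => pvScan kws t (pvScanStep (c :: t) found kws)

def check_critical_software_py_alt (inventory : List (String × List (List (String × String)))) : List (String × List (String × Bool)) :=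
  let items := (PySem.Dict.mk inventory).getD "items" []
  let joined := PySem.Str.join " " (items.map (fun item => PySem.Str.lower (((PySem.Dict.mk item).get? "name").getD "")))
  let found := pvScan pvAllKws joined.toList PySem.Set.empty
  pvTable.map (fun g => (g.1, g.2.map (fun f => (f.1, f.2.any (fun kw => PySem.Set.contains found kw.toList)))))

-- ===== PRECONDITION & SPEC =====
-- Pre_ excludes exactly the inputs where Python A raises KeyError: an item dict without a "name" key.
def Pre_check_critical_software_py (inventory : List (String × List (List (String × String)))) : Prop :=
  ∀ item ∈ (PySem.Dict.mk inventory).getD "items" [], (PySem.Dict.mk item).contains "name" = true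
instance (inventory : List (String × List (List (String × String)))) : Decidable (Pre_check_critical_software_py inventory) := by unfold Pre_check_critical_software_py; infer_instance
def pvWitness_check_critical_software_py : (List (String × List (List (String × String)))) :=
  [("items", [[("name", "Google Chrome")], [("name", "Cisco AnyConnect Secure Mobility Client")]])]
def Spec_check_critical_software_py (inventory : List (String × List (List (String × String)))) (out : List (String × List (String × Bool))) : Prop := out = check_critical_software_py_alt inventory
instance (inventory : List (String × List (List (String × String)))) (out : List (String × List (String × Bool))) : Decidable (Spec_check_critical_software_py inventory out) := by unfold Spec_check_critical_software_py; infer_instance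

-- ===== CLAIM (what is proved, stated in full; the proofs are below) =====
def Claim_equal_check_critical_software_py : Prop := ∀ (inventory : List (String × List (List (String × String)))), Dom_check_critical_software_py inventory → Pre_check_critical_software_py inventory → Spec_check_critical_software_py inventory (check_critical_software_py inventory)

-- ===== LEMMAS AND PROOFS =====

-- a prefix of a ++ c :: b that avoids c stays inside a
theorem pv_prefix_of_append_cons {p a b : List Char} {c : Char} (hc : c ∉ p)
    (h : p <+: a ++ c :: b) : p <+: a := by
  induction p generalizing a with
  | nil => exact List.nil_prefix
  | cons y q ih =>
    cases a with
    | nil =>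
      rcases List.cons_prefix_cons.mp h with ⟨rfl, _⟩
      exact absurd (List.mem_cons_self) hc
    | cons x a' =>
      rcases List.cons_prefix_cons.mp h with ⟨rfl, hq⟩
      exact List.cons_prefix_cons.mpr ⟨rfl, ih (fun hm => hc (List.mem_cons_of_mem _ hm)) hq⟩

-- an infix avoiding c lies on one side of the separator c
theorem pv_infix_append_cons {p a b : List Char} {c : Char} (hc : c ∉ p) :
    p <:+: a ++ c :: b ↔ p <:+: a ∨ p <:+: b := by
  constructor
  · intro h
    induction a with
    | nil =>
      rcases List.infix_cons_iff.mp h with hpre | hb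
      · cases p with
        | nil => exact Or.inl List.nil_infix
        | cons y q =>
          rcases List.cons_prefix_cons.mp hpre with ⟨rfl, _⟩
          exact absurd (List.mem_cons_self) hc
      · exact Or.inr hb
    | cons x a' ih =>
      rcases List.infix_cons_iff.mp h with hpre | hrest
      · exact Or.inl (pv_prefix_of_append_cons hc hpre).isInfix
      · rcases ih hrest with ha' | hb
        · exact Or.inl (ha'.trans (List.infix_cons (List.infix_refl a')))
        · exact Or.inr hb
  · rintro (h | h)
    · rcases h with ⟨s, t, rfl⟩
      exact ⟨s, t ++ c :: b, by simp⟩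
    · rcases h with ⟨s, t, rfl⟩
      exact ⟨(a ++ c :: s), t, by simp⟩

-- a space-free nonempty pattern occurs in the ' '-join iff it occurs in some element
theorem pv_isIn_join (p : List Char) (hsp : ' ' ∉ p) (hne : p ≠ []) (ls : List (List Char)) :
    PySem.Chars.isIn p (PySem.Chars.join [' '] ls) = ls.any (fun l => PySem.Chars.isIn p l) := by
  induction ls with
  | nil =>
    simp only [PySem.Chars.join_nil, List.any_nil]
    rw [PySem.Chars.isIn_eq_false_iff]
    intro h
    exact hne (List.eq_nil_of_infix_nil h)
  | cons x tail ih =>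
    cases tail with
    | nil =>
      simp [PySem.Chars.join_singleton]
    | cons y rest =>
      rw [PySem.Chars.join_cons_cons]
      have hsplit : x ++ [' '] ++ PySem.Chars.join [' '] (y :: rest)
          = x ++ ' ' :: PySem.Chars.join [' '] (y :: rest) := by simp
      rw [hsplit]
      rcases Bool.eq_false_or_eq_true (PySem.Chars.isIn p (x ++ ' ' :: PySem.Chars.join [' '] (y :: rest))) with h1 | h0
      · rw [h1]; symm
        rw [PySem.Chars.isIn_iff_infix] at h1
        rw [pv_infix_append_cons hsp] at h1
        rw [List.any_cons, ← ih, Bool.or_eq_true]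
        rcases h1 with hx | hj
        · exact Or.inl (by rw [PySem.Chars.isIn_iff_infix]; exact hx)
        · exact Or.inr (by rw [PySem.Chars.isIn_iff_infix]; exact hj)
      · rw [h0]; symm
        rw [PySem.Chars.isIn_eq_false_iff] at h0
        rw [pv_infix_append_cons hsp] at h0
        push Not at h0
        rw [List.any_cons, ← ih, Bool.or_eq_false_iff]
        exact ⟨by rw [PySem.Chars.isIn_eq_false_iff]; exact h0.1,
               by rw [PySem.Chars.isIn_eq_false_iff]; exact h0.2⟩

-- Str-level: per-name scan for a space-free nonempty keyword = substring test on the joined string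
theorem pv_any_isIn_join (kw : String) (hsp : ' ' ∉ kw.toList) (hne : kw.toList ≠ []) (names : List String) :
    (names.any fun n => PySem.Str.isIn kw n) = PySem.Str.isIn kw (PySem.Str.join " " names) := by
  have hb : PySem.Str.isIn kw (PySem.Str.join " " names)
      = PySem.Chars.isIn kw.toList (PySem.Chars.join [' '] (names.map String.toList)) := by
    simp [PySem.Str.isIn, PySem.Str.join]
  rw [hb, pv_isIn_join kw.toList hsp hne, List.any_map]
  rfl

-- what one pass of the inner keyword loop adds to found
theorem pv_scanStep_mem (suf : List Char) (kws : List (List Char)) (found : PySem.Set (List Char)) (x : List Char) :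
    x ∈ pvScanStep suf found kws ↔ x ∈ found ∨ (x ∈ kws ∧ x <+: suf) := by
  induction kws generalizing found with
  | nil => simp [pvScanStep]
  | cons a l ih =>
    simp only [pvScanStep, List.foldl_cons] at *
    rw [ih]
    by_cases h : PySem.Chars.startswith suf a = true
    · have ha : a <+: suf := (PySem.Chars.startswith_iff suf a).mp h
      simp only [h, if_true, PySem.Set.mem_add, List.mem_cons]
      constructor
      · rintro ((hf | rfl) | ⟨hl, hp⟩)
        · exact Or.inl hf
        · exact Or.inr ⟨Or.inl rfl, ha⟩
        · exact Or.inr ⟨Or.inr hl, hp⟩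
      · rintro (hf | ⟨(rfl | hl), hp⟩)
        · exact Or.inl (Or.inl hf)
        · exact Or.inl (Or.inr rfl)
        · exact Or.inr ⟨hl, hp⟩
    · have ha : ¬ a <+: suf := fun hp => h ((PySem.Chars.startswith_iff suf a).mpr hp)
      simp only [h, List.mem_cons]
      constructor
      · rintro (hf | ⟨hl, hp⟩)
        · exact Or.inl hf
        · exact Or.inr ⟨Or.inr hl, hp⟩
      · rintro (hf | ⟨(rfl | hl), hp⟩)
        · exact Or.inl hf
        · exact absurd hp ha
        · exact Or.inr ⟨hl, hp⟩

-- after the whole sweep, found holds exactly the keywords that are a prefix of some suffix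
theorem pv_scan_mem (kws : List (List Char)) (text : List Char) (found : PySem.Set (List Char)) (x : List Char) :
    x ∈ pvScan kws text found ↔ x ∈ found ∨ (x ∈ kws ∧ ∃ j, x <+: text.drop j) := by
  induction text generalizing found with
  | nil =>
    simp only [pvScan]
    rw [pv_scanStep_mem]
    simp
  | cons c t ih =>
    simp only [pvScan]
    rw [ih, pv_scanStep_mem]
    have hdrop : (∃ j, x <+: (c :: t).drop j) ↔ (x <+: c :: t ∨ ∃ j, x <+: t.drop j) := by
      constructor
      · rintro ⟨j, hj⟩
        cases j with
        | zero => exact Or.inl hj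
        | succ j => exact Or.inr ⟨j, hj⟩
      · rintro (h | ⟨j, hj⟩)
        · exact ⟨0, h⟩
        · exact ⟨j + 1, hj⟩
    rw [hdrop]
    tauto

-- membership of a keyword in the collected set = the substring test on the joined text
theorem pv_found_eq (names : List String) (kw : String) (hmem : kw.toList ∈ pvAllKws) :
    PySem.Set.contains (pvScan pvAllKws (PySem.Str.join " " names).toList PySem.Set.empty) kw.toList
      = PySem.Str.isIn kw (PySem.Str.join " " names) := by
  rw [Bool.eq_iff_iff, PySem.Set.contains_iff, pv_scan_mem, PySem.Str.isIn_iff_infix,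
      ← PySem.Chars.isIn_iff_infix, ← PySem.Chars.exists_prefix_drop_iff_isIn]
  simp [PySem.Set.empty, hmem]

-- the two result bodies agree for any list of (lowercased) names
theorem pv_bodies_eq (names : List String) :
    ([("browsers",
        [("chrome", names.any (fun name => PySem.Str.isIn "chrome" name)),
         ("firefox", names.any (fun name => PySem.Str.isIn "firefox" name)),
         ("safari", names.any (fun name => PySem.Str.isIn "safari" name)),
         ("edge", names.any (fun name => PySem.Str.isIn "edge" name))]),
      ("security",
        [("antivirus", (["crowdstrike", "sentinel", "sophos", "malwarebytes"] : List String).any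
            (fun av => PySem.Str.isIn av (PySem.Str.join " " names))),
         ("vpn", (["zscaler", "globalprotect", "cisco anyconnect", "openvpn"] : List String).any
            (fun vpn => PySem.Str.isIn vpn (PySem.Str.join " " names))),
         ("password_manager", (["1password", "lastpass", "dashlane", "bitwarden"] : List String).any
            (fun pm => PySem.Str.isIn pm (PySem.Str.join " " names)))]),
      ("productivity",
        [("office", (["microsoft office", "microsoft word", "microsoft excel"] : List String).any
            (fun office => PySem.Str.isIn office (PySem.Str.join " " names))),
         ("slack", names.any (fun name => PySem.Str.isIn "slack" name)),
         ("zoom", names.any (fun name => PySem.Str.isIn "zoom" name)),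
         ("teams", names.any (fun name => PySem.Str.isIn "teams" name))])]
      : List (String × List (String × Bool)))
    = pvTable.map (fun g => (g.1, g.2.map (fun f => (f.1, f.2.any (fun kw =>
        PySem.Set.contains (pvScan pvAllKws (PySem.Str.join " " names).toList PySem.Set.empty) kw.toList))))) := by
  simp only [pvTable, List.map_cons, List.map_nil, List.any_cons, List.any_nil, Bool.or_false]
  rw [pv_found_eq names "chrome" (by decide), pv_found_eq names "firefox" (by decide),
      pv_found_eq names "safari" (by decide), pv_found_eq names "edge" (by decide),
      pv_found_eq names "crowdstrike" (by decide), pv_found_eq names "sentinel" (by decide),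
      pv_found_eq names "sophos" (by decide), pv_found_eq names "malwarebytes" (by decide),
      pv_found_eq names "zscaler" (by decide), pv_found_eq names "globalprotect" (by decide),
      pv_found_eq names "cisco anyconnect" (by decide), pv_found_eq names "openvpn" (by decide),
      pv_found_eq names "1password" (by decide), pv_found_eq names "lastpass" (by decide),
      pv_found_eq names "dashlane" (by decide), pv_found_eq names "bitwarden" (by decide),
      pv_found_eq names "microsoft office" (by decide), pv_found_eq names "microsoft word" (by decide),
      pv_found_eq names "microsoft excel" (by decide),
      pv_found_eq names "slack" (by decide), pv_found_eq names "zoom" (by decide),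
      pv_found_eq names "teams" (by decide),
      pv_any_isIn_join "chrome" (by decide) (by decide),
      pv_any_isIn_join "firefox" (by decide) (by decide),
      pv_any_isIn_join "safari" (by decide) (by decide),
      pv_any_isIn_join "edge" (by decide) (by decide),
      pv_any_isIn_join "slack" (by decide) (by decide),
      pv_any_isIn_join "zoom" (by decide) (by decide),
      pv_any_isIn_join "teams" (by decide) (by decide)]

-- ===== VERDICT (by name: the statement is the Claim_ definition above) =====
theorem check_critical_software_py_spec : Claim_equal_check_critical_software_py := by
  intro inventory _dom _pre
  unfold Spec_check_critical_software_py
  exact pv_bodies_eq _
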